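-- pv_equiv track=rewrite | github.com/tomiio/BFMC | src/control/utils/utils.py | find_index_2_lane
-- ===== SOURCE A (Python) =====
-- def find_index_2_lane(points = [(318, 200), (310, 250), (319, 300)] , target_x = 320):
--     """
--     Find index of data between a center point
--
--     Parameters:
--     - points
--     - target
--
--     Returns:
--     - left_index
--     - right_index
--     """
--     # Tìm giá trị x gần nhất bên trái và bên phải
--     left = None
--     right = None
--     min_diff_left = float('inf')
--     min_diff_right = float('inf')
--
--     for x, _ in points:
--         if x < target_x and (target_x - x) < min_diff_left:
--             min_diff_left = target_x - x
--             left = x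
--         elif x > target_x and (x - target_x) < min_diff_right:
--             min_diff_right = x - target_x
--             right = x
--
--     # Tìm vị trí của các giá trị trong danh sách
--     left_index = None
--     right_index = None
--
--     if left is not None:
--         left_index = [i for i, (x, _) in enumerate(points) if x == left][0]
--
--     if right is not None:
--         right_index = [i for i, (x, _) in enumerate(points) if x == right][0]
--
--     return left_index, right_index
-- ===== SOURCE B (Python) =====
-- def find_index_2_lane(points = [(318, 200), (310, 250), (319, 300)] , target_x = 320):
--     # Nearest x left of target = largest x below it; nearest right = smallest x above it.
--     # max/min with a key return the FIRST extremal pair, i.e. the first occurrence of that x.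
--     lefts = [(i, x) for i, (x, _) in enumerate(points) if x < target_x]
--     rights = [(i, x) for i, (x, _) in enumerate(points) if x > target_x]
--     left_index = max(lefts, key=lambda p: p[1])[0] if lefts else None
--     right_index = min(rights, key=lambda p: p[1])[0] if rights else None
--     return left_index, right_index
-- ===== Notes on version B (the rewrite author's own statement) =====
-- stated objective: simpler
-- what changed: B replaces A's state-machine loop (tracking left/right values and min-diffs) plus two trailing index-search comprehensions by two filtered (index, x) comprehensions and a single max/min with a key, whose first-extremal tie rule gives the first occurrence directly.
import Mathlib
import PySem

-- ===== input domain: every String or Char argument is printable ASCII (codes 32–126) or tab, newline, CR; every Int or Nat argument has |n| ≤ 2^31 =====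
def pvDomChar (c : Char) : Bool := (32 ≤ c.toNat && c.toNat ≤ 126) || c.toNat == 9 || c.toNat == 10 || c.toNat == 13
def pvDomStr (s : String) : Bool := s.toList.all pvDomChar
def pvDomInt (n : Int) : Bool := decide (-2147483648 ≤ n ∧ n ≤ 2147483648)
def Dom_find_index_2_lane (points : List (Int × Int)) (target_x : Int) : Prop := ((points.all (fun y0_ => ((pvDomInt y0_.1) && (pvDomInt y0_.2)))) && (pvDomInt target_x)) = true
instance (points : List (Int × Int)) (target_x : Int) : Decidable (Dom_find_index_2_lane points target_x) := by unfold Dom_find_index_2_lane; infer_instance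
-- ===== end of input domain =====

-- B finds the nearest-left/right indices directly with max/min over filtered (index, x) pairs,
-- replacing A's state-machine loop plus two trailing index-search comprehensions (objective: simpler).


-- ===== PORT A =====
-- A's loop body; float('inf') is modelled as `none : Option Int` (exact: min_diff_* is infinite
-- exactly until its first update, and only finite Int differences are ever stored).
def pvStepA (target_x : Int) (s : Option Int × Option Int × Option Int × Option Int) (xy : Int × Int) :
    Option Int × Option Int × Option Int × Option Int :=
  if xy.1 < target_x && (match s.2.2.1 with | none => true | some m => decide (target_x - xy.1 < m)) then
    (some xy.1, s.2.1, some (target_x - xy.1), s.2.2.2)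
  else if target_x < xy.1 && (match s.2.2.2 with | none => true | some m => decide (xy.1 - target_x < m)) then
    (s.1, some xy.1, s.2.2.1, some (xy.1 - target_x))
  else s

-- the `[…][0]` of A's comprehension is ported as pyGet? … 0 (none = IndexError, unreachable: the guard
-- `left is not None` guarantees a match exists)
def find_index_2_lane (points : List (Int × Int)) (target_x : Int) : Option Int × Option Int :=
  let s := points.foldl (pvStepA target_x) (none, none, none, none)
  let left_index : Option Int := match s.1 with
    | none => none
    | some v => PySem.List.pyGet? (((PySem.List.enumerate points 0).filter (fun ip => ip.2.1 == v)).map (fun ip => ip.1)) 0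
  let right_index : Option Int := match s.2.1 with
    | none => none
    | some v => PySem.List.pyGet? (((PySem.List.enumerate points 0).filter (fun ip => ip.2.1 == v)).map (fun ip => ip.1)) 0
  (left_index, right_index)

-- ===== PORT B =====
def find_index_2_lane_alt (points : List (Int × Int)) (target_x : Int) : Option Int × Option Int :=
  let lefts := ((PySem.List.enumerate points 0).filter (fun ip => decide (ip.2.1 < target_x))).map (fun ip => (ip.1, ip.2.1))
  let rights := ((PySem.List.enumerate points 0).filter (fun ip => decide (target_x < ip.2.1))).map (fun ip => (ip.1, ip.2.1))
  let left_index := (PySem.List.max? lefts (fun p => p.2)).map (fun p => p.1)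
  let right_index := (PySem.List.min? rights (fun p => p.2)).map (fun p => p.1)
  (left_index, right_index)

-- ===== PRECONDITION & SPEC =====
def Spec_find_index_2_lane (points : List (Int × Int)) (target_x : Int) (out : Option Int × Option Int) : Prop := out = find_index_2_lane_alt points target_x
instance (points : List (Int × Int)) (target_x : Int) (out : Option Int × Option Int) : Decidable (Spec_find_index_2_lane points target_x out) := by unfold Spec_find_index_2_lane; infer_instance

-- ===== CLAIM (what is proved, stated in full; the proofs are below) =====
def Claim_equal_find_index_2_lane : Prop := ∀ (points : List (Int × Int)) (target_x : Int), Dom_find_index_2_lane points target_x → Spec_find_index_2_lane points target_x (find_index_2_lane points target_x)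

-- ===== LEMMAS AND PROOFS =====

-- max?/min? of a list extended by one element (the foldl step, exposed as an equation)
theorem pv_max?_append {α : Type} (l : List α) (a : α) (key : α → Int) :
    PySem.List.max? (l ++ [a]) key =
      (match PySem.List.max? l key with
       | none => some a
       | some m => if key m < key a then some a else some m) := by
  simp [PySem.List.max?, List.foldl_append]; rfl

theorem pv_min?_append {α : Type} (l : List α) (a : α) (key : α → Int) :
    PySem.List.min? (l ++ [a]) key =
      (match PySem.List.min? l key with
       | none => some a
       | some m => if key a < key m then some a else some m) := by
  simp [PySem.List.min?, List.foldl_append]; rfl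

-- an x that strictly beats the current best has no earlier occurrence
theorem pv_fresh_left (t : Int) (es : List (Int × (Int × Int))) (x : Int) (hlt : x < t)
    (hbeat : ∀ m, PySem.List.max? ((es.filter (fun ip => decide (ip.2.1 < t))).map (fun ip => (ip.1, ip.2.1))) (fun p => p.2) = some m → m.2 < x) :
    es.filter (fun ip => ip.2.1 == x) = [] := by
  rw [List.filter_eq_nil_iff]
  intro ip hip hbeq
  simp only [beq_iff_eq] at hbeq
  have hmemL : (ip.1, ip.2.1) ∈ (es.filter (fun ip => decide (ip.2.1 < t))).map (fun ip => (ip.1, ip.2.1)) := by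
    exact List.mem_map.2 ⟨ip, List.mem_filter.2 ⟨hip, by simpa [hbeq] using hlt⟩, rfl⟩
  cases hml : PySem.List.max? ((es.filter (fun ip => decide (ip.2.1 < t))).map (fun ip => (ip.1, ip.2.1))) (fun p => p.2) with
  | none =>
      rw [PySem.List.max?_eq_none_iff] at hml
      rw [hml] at hmemL
      exact absurd hmemL (List.not_mem_nil)
  | some m =>
      have h1 := PySem.List.max?_isMax hml _ hmemL
      have h2 := hbeat m hml
      simp only at h1
      omega

theorem pv_fresh_right (t : Int) (es : List (Int × (Int × Int))) (x : Int) (hgt : t < x)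
    (hbeat : ∀ m, PySem.List.min? ((es.filter (fun ip => decide (t < ip.2.1))).map (fun ip => (ip.1, ip.2.1))) (fun p => p.2) = some m → x < m.2) :
    es.filter (fun ip => ip.2.1 == x) = [] := by
  rw [List.filter_eq_nil_iff]
  intro ip hip hbeq
  simp only [beq_iff_eq] at hbeq
  have hmemR : (ip.1, ip.2.1) ∈ (es.filter (fun ip => decide (t < ip.2.1))).map (fun ip => (ip.1, ip.2.1)) := by
    exact List.mem_map.2 ⟨ip, List.mem_filter.2 ⟨hip, by simpa [hbeq] using hgt⟩, rfl⟩
  cases hmr : PySem.List.min? ((es.filter (fun ip => decide (t < ip.2.1))).map (fun ip => (ip.1, ip.2.1))) (fun p => p.2) with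
  | none =>
      rw [PySem.List.min?_eq_none_iff] at hmr
      rw [hmr] at hmemR
      exact absurd hmemR (List.not_mem_nil)
  | some m =>
      have h1 := PySem.List.min?_isMin hmr _ hmemR
      have h2 := hbeat m hmr
      simp only at h1
      omega

theorem pv_pyGet?_zero {α : Type} (xs : List α) : PySem.List.pyGet? xs 0 = xs.head? := by
  cases xs <;> simp [PySem.List.pyGet?, PySem.List.pyIdx?]

theorem pv_main (t : Int) (es : List (Int × (Int × Int))) :
    ((es.map (fun ip => ip.2)).foldl (pvStepA t) (none, none, none, none)
      = ((PySem.List.max? ((es.filter (fun ip => decide (ip.2.1 < t))).map (fun ip => (ip.1, ip.2.1))) (fun p => p.2)).map (fun p => p.2),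
         (PySem.List.min? ((es.filter (fun ip => decide (t < ip.2.1))).map (fun ip => (ip.1, ip.2.1))) (fun p => p.2)).map (fun p => p.2),
         (PySem.List.max? ((es.filter (fun ip => decide (ip.2.1 < t))).map (fun ip => (ip.1, ip.2.1))) (fun p => p.2)).map (fun p => t - p.2),
         (PySem.List.min? ((es.filter (fun ip => decide (t < ip.2.1))).map (fun ip => (ip.1, ip.2.1))) (fun p => p.2)).map (fun p => p.2 - t)))
  ∧ (∀ j v, PySem.List.max? ((es.filter (fun ip => decide (ip.2.1 < t))).map (fun ip => (ip.1, ip.2.1))) (fun p => p.2) = some (j, v) →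
      ((es.filter (fun ip => ip.2.1 == v)).head?).map (fun ip => ip.1) = some j)
  ∧ (∀ j v, PySem.List.min? ((es.filter (fun ip => decide (t < ip.2.1))).map (fun ip => (ip.1, ip.2.1))) (fun p => p.2) = some (j, v) →
      ((es.filter (fun ip => ip.2.1 == v)).head?).map (fun ip => ip.1) = some j) := by
  induction es using List.reverseRecOn with
  | nil =>
      refine ⟨rfl, ?_, ?_⟩ <;> intro j v h <;> simp [PySem.List.max?, PySem.List.min?] at h
  | append_singleton es e ih =>
      obtain ⟨ih1, ih2, ih3⟩ := ih
      rcases lt_trichotomy e.2.1 t with hlt | heq | hgt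
      · -- new element lies strictly left of the target
        have hnotgt : ¬ (t < e.2.1) := by omega
        have hL : (es ++ [e]).filter (fun ip => decide (ip.2.1 < t))
            = es.filter (fun ip => decide (ip.2.1 < t)) ++ [e] := by
          simp [List.filter_append, hlt]
        have hR : (es ++ [e]).filter (fun ip => decide (t < ip.2.1))
            = es.filter (fun ip => decide (t < ip.2.1)) := by
          simp [List.filter_append, hnotgt]
        rw [hL, hR]
        simp only [List.map_append, List.map_cons, List.map_nil, List.foldl_append,
          List.foldl_cons, List.foldl_nil]
        rw [ih1, pv_max?_append]
        cases hml : PySem.List.max? ((es.filter (fun ip => decide (ip.2.1 < t))).map (fun ip => (ip.1, ip.2.1))) (fun p => p.2) with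
        | none =>
            have hfresh : es.filter (fun ip => ip.2.1 == e.2.1) = [] :=
              pv_fresh_left t es e.2.1 hlt (by intro m hm; rw [hml] at hm; cases hm)
            refine ⟨?_, ?_, ?_⟩
            · simp [pvStepA, hlt]
            · intro j v h
              simp only [Option.some.injEq, Prod.mk.injEq] at h
              obtain ⟨h1, h2⟩ := h
              subst h1; subst h2
              rw [List.filter_append, hfresh]
              simp
            · intro j v h
              obtain ⟨p, hp, hp1⟩ := Option.map_eq_some_iff.1 (ih3 j v h)
              rw [List.filter_append, List.head?_append, hp]
              simp [hp1]
        | some m =>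
            by_cases hcmp : m.2 < e.2.1
            · have harith : t - e.2.1 < t - m.2 := by omega
              have hfresh : es.filter (fun ip => ip.2.1 == e.2.1) = [] :=
                pv_fresh_left t es e.2.1 hlt
                  (by intro m' hm'; rw [hml] at hm'; cases hm'; exact hcmp)
              refine ⟨?_, ?_, ?_⟩
              · simp [pvStepA, hlt, harith, hcmp]
              · intro j v h
                simp only [hcmp, if_true] at h
                simp only [Option.some.injEq, Prod.mk.injEq] at h
                obtain ⟨h1, h2⟩ := h
                subst h1; subst h2
                rw [List.filter_append, hfresh]
                simp
              · intro j v h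
                obtain ⟨p, hp, hp1⟩ := Option.map_eq_some_iff.1 (ih3 j v h)
                rw [List.filter_append, List.head?_append, hp]
                simp [hp1]
            · have harith : ¬ (t - e.2.1 < t - m.2) := by omega
              refine ⟨?_, ?_, ?_⟩
              · simp [pvStepA, hlt, hnotgt, harith, hcmp]
              · intro j v h
                simp only [hcmp, if_false] at h
                have h' : PySem.List.max? ((es.filter (fun ip => decide (ip.2.1 < t))).map (fun ip => (ip.1, ip.2.1))) (fun p => p.2) = some (j, v) := by
                  rw [hml]; exact h
                obtain ⟨p, hp, hp1⟩ := Option.map_eq_some_iff.1 (ih2 j v h')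
                rw [List.filter_append, List.head?_append, hp]
                simp [hp1]
              · intro j v h
                obtain ⟨p, hp, hp1⟩ := Option.map_eq_some_iff.1 (ih3 j v h)
                rw [List.filter_append, List.head?_append, hp]
                simp [hp1]
      · -- new element sits exactly at the target: nothing changes
        have h1 : ¬ (e.2.1 < t) := by omega
        have h2 : ¬ (t < e.2.1) := by omega
        have hL : (es ++ [e]).filter (fun ip => decide (ip.2.1 < t))
            = es.filter (fun ip => decide (ip.2.1 < t)) := by
          simp [List.filter_append, h1]
        have hR : (es ++ [e]).filter (fun ip => decide (t < ip.2.1))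
            = es.filter (fun ip => decide (t < ip.2.1)) := by
          simp [List.filter_append, h2]
        rw [hL, hR]
        simp only [List.map_append, List.map_cons, List.map_nil, List.foldl_append,
          List.foldl_cons, List.foldl_nil]
        rw [ih1]
        refine ⟨?_, ?_, ?_⟩
        · simp [pvStepA, h1, h2]
        · intro j v h
          obtain ⟨p, hp, hp1⟩ := Option.map_eq_some_iff.1 (ih2 j v h)
          rw [List.filter_append, List.head?_append, hp]
          simp [hp1]
        · intro j v h
          obtain ⟨p, hp, hp1⟩ := Option.map_eq_some_iff.1 (ih3 j v h)
          rw [List.filter_append, List.head?_append, hp]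
          simp [hp1]
      · -- new element lies strictly right of the target
        have hnotlt : ¬ (e.2.1 < t) := by omega
        have hL : (es ++ [e]).filter (fun ip => decide (ip.2.1 < t))
            = es.filter (fun ip => decide (ip.2.1 < t)) := by
          simp [List.filter_append, hnotlt]
        have hR : (es ++ [e]).filter (fun ip => decide (t < ip.2.1))
            = es.filter (fun ip => decide (t < ip.2.1)) ++ [e] := by
          simp [List.filter_append, hgt]
        rw [hL, hR]
        simp only [List.map_append, List.map_cons, List.map_nil, List.foldl_append,
          List.foldl_cons, List.foldl_nil]
        rw [ih1, pv_min?_append]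
        cases hmr : PySem.List.min? ((es.filter (fun ip => decide (t < ip.2.1))).map (fun ip => (ip.1, ip.2.1))) (fun p => p.2) with
        | none =>
            have hfresh : es.filter (fun ip => ip.2.1 == e.2.1) = [] :=
              pv_fresh_right t es e.2.1 hgt (by intro m hm; rw [hmr] at hm; cases hm)
            refine ⟨?_, ?_, ?_⟩
            · simp [pvStepA, hnotlt, hgt]
            · intro j v h
              obtain ⟨p, hp, hp1⟩ := Option.map_eq_some_iff.1 (ih2 j v h)
              rw [List.filter_append, List.head?_append, hp]
              simp [hp1]
            · intro j v h
              simp only [Option.some.injEq, Prod.mk.injEq] at h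
              obtain ⟨h1, h2⟩ := h
              subst h1; subst h2
              rw [List.filter_append, hfresh]
              simp
        | some m =>
            by_cases hcmp : e.2.1 < m.2
            · have harith : e.2.1 - t < m.2 - t := by omega
              have hfresh : es.filter (fun ip => ip.2.1 == e.2.1) = [] :=
                pv_fresh_right t es e.2.1 hgt
                  (by intro m' hm'; rw [hmr] at hm'; cases hm'; exact hcmp)
              refine ⟨?_, ?_, ?_⟩
              · simp [pvStepA, hnotlt, hgt, harith, hcmp]
              · intro j v h
                obtain ⟨p, hp, hp1⟩ := Option.map_eq_some_iff.1 (ih2 j v h)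
                rw [List.filter_append, List.head?_append, hp]
                simp [hp1]
              · intro j v h
                simp only [hcmp, if_true] at h
                simp only [Option.some.injEq, Prod.mk.injEq] at h
                obtain ⟨h1, h2⟩ := h
                subst h1; subst h2
                rw [List.filter_append, hfresh]
                simp
            · have harith : ¬ (e.2.1 - t < m.2 - t) := by omega
              refine ⟨?_, ?_, ?_⟩
              · simp [pvStepA, hnotlt, hgt, harith, hcmp]
              · intro j v h
                obtain ⟨p, hp, hp1⟩ := Option.map_eq_some_iff.1 (ih2 j v h)
                rw [List.filter_append, List.head?_append, hp]
                simp [hp1]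
              · intro j v h
                simp only [hcmp, if_false] at h
                have h' : PySem.List.min? ((es.filter (fun ip => decide (t < ip.2.1))).map (fun ip => (ip.1, ip.2.1))) (fun p => p.2) = some (j, v) := by
                  rw [hmr]; exact h
                obtain ⟨p, hp, hp1⟩ := Option.map_eq_some_iff.1 (ih3 j v h')
                rw [List.filter_append, List.head?_append, hp]
                simp [hp1]

-- ===== VERDICT (by name: the statement is the Claim_ definition above) =====
theorem find_index_2_lane_spec : Claim_equal_find_index_2_lane := by
  intro points t _
  obtain ⟨ih1, ih2, ih3⟩ := pv_main t (PySem.List.enumerate points 0)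
  rw [PySem.List.map_snd_enumerate] at ih1
  unfold Spec_find_index_2_lane find_index_2_lane find_index_2_lane_alt
  cases hml : PySem.List.max? (((PySem.List.enumerate points 0).filter (fun ip => decide (ip.2.1 < t))).map (fun ip => (ip.1, ip.2.1))) (fun p => p.2) with
  | none =>
      cases hmr : PySem.List.min? (((PySem.List.enumerate points 0).filter (fun ip => decide (t < ip.2.1))).map (fun ip => (ip.1, ip.2.1))) (fun p => p.2) with
      | none => simp [ih1, hml, hmr]
      | some m =>
          obtain ⟨j, v⟩ := m
          have hd := ih3 j v hmr
          obtain ⟨p, hp, hp1⟩ := Option.map_eq_some_iff.1 hd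
          simp [ih1, hml, hmr, pv_pyGet?_zero, List.head?_map, hp, hp1]
  | some m =>
      obtain ⟨j, v⟩ := m
      have hd := ih2 j v hml
      obtain ⟨p, hp, hp1⟩ := Option.map_eq_some_iff.1 hd
      cases hmr : PySem.List.min? (((PySem.List.enumerate points 0).filter (fun ip => decide (t < ip.2.1))).map (fun ip => (ip.1, ip.2.1))) (fun p => p.2) with
      | none => simp [ih1, hml, hmr, pv_pyGet?_zero, List.head?_map, hp, hp1]
      | some m' =>
          obtain ⟨j', v'⟩ := m'
          have hd' := ih3 j' v' hmr
          obtain ⟨p', hp', hp1'⟩ := Option.map_eq_some_iff.1 hd'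
          simp [ih1, hml, hmr, pv_pyGet?_zero, List.head?_map, hp, hp1, hp', hp1']
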